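-- pv_equiv track=rewrite | github.com/keerthirajsivashankar/My_Python_Solutions | Hard/3197.py | _minimumArea
-- ===== SOURCE A (Python) =====
-- import math
-- from typing import List
--
-- def _minimumArea(
--
--     grid: List[List[int]],
--     si: int,
--     ei: int,
--     sj: int,
--     ej: int,
-- ) -> int:
--   """
--   Calculates the minimum area of a rectangle enclosing all '1's within
--   a specified sub-grid.
--
--   Args:
--     grid: The full grid.
--     si, ei: Start and end row indices of the sub-grid.
--     sj, ej: Start and end column indices of the sub-grid.
--
--   Returns:
--     The area of the minimum enclosing rectangle. Returns 0 if no '1's are present.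
--   """
--   x1, y1 = math.inf, math.inf
--   x2, y2 = -1, -1
--
--   for i in range(si, ei + 1):
--     for j in range(sj, ej + 1):
--       if grid[i][j] == 1:
--         x1 = min(x1, i)
--         y1 = min(y1, j)
--         x2 = max(x2, i)
--         y2 = max(y2, j)
--
--   # Check if any '1' was found in the sub-grid.
--   if x1 == math.inf:
--     return 0
--
--   # Calculate and return the area.
--   return (x2 - x1 + 1) * (y2 - y1 + 1)
-- ===== SOURCE B (Python) =====
-- from typing import List
--
--
-- def _minimumArea(
--     grid: List[List[int]],
--     si: int,
--     ei: int,
--     sj: int,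
--     ej: int,
-- ) -> int:
--     # Gather the coordinates of all 1-cells in the sub-grid, then reduce.
--     ones = [(i, j)
--             for i in range(si, ei + 1)
--             for j in range(sj, ej + 1)
--             if grid[i][j] == 1]
--     if not ones:
--         return 0
--     rows = [p[0] for p in ones]
--     cols = [p[1] for p in ones]
--     return (max(rows) - min(rows) + 1) * (max(cols) - min(cols) + 1)
-- ===== Notes on version B (the rewrite author's own statement) =====
-- stated objective: simpler
-- what changed: B replaces A's single-pass four-accumulator (inf/-1 sentinel) loop by a gather pass that collects the 1-cell coordinates and then takes min/max over the row and column lists, guarding the empty case.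
-- outside the precondition, e.g. on _minimumArea([[1], [0]], -2, -2, 0, 0): A returns 2, B returns 1
import Mathlib
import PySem

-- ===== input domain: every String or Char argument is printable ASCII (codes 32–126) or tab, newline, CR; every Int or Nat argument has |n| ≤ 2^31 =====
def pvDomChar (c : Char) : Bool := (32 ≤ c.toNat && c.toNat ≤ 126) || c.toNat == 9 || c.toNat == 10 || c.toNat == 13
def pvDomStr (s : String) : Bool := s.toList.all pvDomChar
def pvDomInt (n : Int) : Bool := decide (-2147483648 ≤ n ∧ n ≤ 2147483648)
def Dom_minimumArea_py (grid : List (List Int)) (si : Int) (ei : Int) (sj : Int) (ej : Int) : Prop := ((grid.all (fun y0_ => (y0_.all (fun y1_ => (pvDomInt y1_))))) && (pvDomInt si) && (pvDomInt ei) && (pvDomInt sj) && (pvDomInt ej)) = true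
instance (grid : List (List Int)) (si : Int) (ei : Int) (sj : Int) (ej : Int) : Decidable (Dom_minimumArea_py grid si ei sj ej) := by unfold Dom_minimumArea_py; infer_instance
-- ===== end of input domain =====

-- B gathers the 1-cell coordinates first and then reduces with min/max (objective: simpler decomposition, same cost).

-- ===== PORT A =====
-- A's four accumulators: x1 y1 as Option Int (none = math.inf), x2 y2 as Int starting -1
def pvStep (s : Option Int × Option Int × Int × Int) (i j : Int) :
    Option Int × Option Int × Int × Int :=
  (some (match s.1 with | none => i | some x => min x i),
   some (match s.2.1 with | none => j | some y => min y j),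
   max s.2.2.1 i, max s.2.2.2 j)

def minimumArea_py (grid : List (List Int)) (si : Int) (ei : Int) (sj : Int) (ej : Int) : Int :=
  let st := (PySem.List.pyRange si (ei+1) 1).foldl
    (fun s i => (PySem.List.pyRange sj (ej+1) 1).foldl
      (fun s j => if (PySem.List.pyGet? grid i).bind (fun row => PySem.List.pyGet? row j) = some 1 then pvStep s i j else s) s)
    ((none : Option Int), (none : Option Int), (-1 : Int), (-1 : Int))
  match st with
  | (some x1, some y1, x2, y2) => (x2 - x1 + 1) * (y2 - y1 + 1)
  | _ => 0

-- ===== PORT B =====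
def minimumArea_py_alt (grid : List (List Int)) (si : Int) (ei : Int) (sj : Int) (ej : Int) : Int :=
  let ones := (PySem.List.pyRange si (ei+1) 1).flatMap
    (fun i => ((PySem.List.pyRange sj (ej+1) 1).filter
        (fun j => (PySem.List.pyGet? grid i).bind (fun row => PySem.List.pyGet? row j) == some 1)).map (fun j => (i, j)))
  if ones.isEmpty then 0
  else
    let rows := ones.map (fun p => p.1)
    let cols := ones.map (fun p => p.2)
    -- ones is nonempty here, so min?/max? are all `some`; `.getD 0` only discharges the Option
    ((PySem.List.max? rows (fun x => x)).getD 0 - (PySem.List.min? rows (fun x => x)).getD 0 + 1) *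
      ((PySem.List.max? cols (fun x => x)).getD 0 - (PySem.List.min? cols (fun x => x)).getD 0 + 1)

-- ===== PRECONDITION & SPEC =====
-- Pre_ restricts to the natural sub-grid domain: either a range is empty (nothing is indexed) or every
-- visited index is a valid NONNEGATIVE index.  It excludes (a) inputs where grid[i][j] raises IndexError
-- and (b) negative indices, where Python's wraparound collides with A's -1 sentinel and yields an
-- accidental area (outside the natural domain).
def Pre_minimumArea_py (grid : List (List Int)) (si : Int) (ei : Int) (sj : Int) (ej : Int) : Prop :=
  (ei < si ∨ ej < sj) ∨
    (0 ≤ si ∧ 0 ≤ sj ∧ ei < (grid.length : Int) ∧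
      ∀ row ∈ (grid.drop si.toNat).take (ei + 1 - si).toNat, ej < (row.length : Int))
instance (grid : List (List Int)) (si : Int) (ei : Int) (sj : Int) (ej : Int) : Decidable (Pre_minimumArea_py grid si ei sj ej) := by unfold Pre_minimumArea_py; infer_instance

def pvWitness_minimumArea_py : List (List Int) × Int × Int × Int × Int := ([[1, 0], [0, 1]], 0, 1, 0, 1)

def Spec_minimumArea_py (grid : List (List Int)) (si : Int) (ei : Int) (sj : Int) (ej : Int) (out : Int) : Prop := out = minimumArea_py_alt grid si ei sj ej
instance (grid : List (List Int)) (si : Int) (ei : Int) (sj : Int) (ej : Int) (out : Int) : Decidable (Spec_minimumArea_py grid si ei sj ej out) := by unfold Spec_minimumArea_py; infer_instance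

-- ===== CLAIM (what is proved, stated in full; the proofs are below) =====
def Claim_equal_minimumArea_py : Prop := ∀ (grid : List (List Int)) (si : Int) (ei : Int) (sj : Int) (ej : Int), Dom_minimumArea_py grid si ei sj ej → Pre_minimumArea_py grid si ei sj ej → Spec_minimumArea_py grid si ei sj ej (minimumArea_py grid si ei sj ej)

-- ===== LEMMAS AND PROOFS =====

-- A's inner loop over j (fixed i) equals a fold of pvStep over the filtered, paired column list.
theorem pv_inner (grid : List (List Int)) (i : Int) (ks : List Int)
    (s : Option Int × Option Int × Int × Int) :
    ks.foldl (fun s j => if (PySem.List.pyGet? grid i).bind (fun row => PySem.List.pyGet? row j) = some 1 then pvStep s i j else s) s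
      = ((ks.filter (fun j => (PySem.List.pyGet? grid i).bind (fun row => PySem.List.pyGet? row j) == some 1)).map (fun j => (i, j))).foldl
          (fun s p => pvStep s p.1 p.2) s := by
  induction ks generalizing s with
  | nil => rfl
  | cons k t ih =>
    by_cases h : (PySem.List.pyGet? grid i).bind (fun row => PySem.List.pyGet? row k) = some 1
    · simp [List.foldl_cons, h, ih]
    · simp [List.foldl_cons, h, ih]

-- A's nested loop equals a fold of pvStep over B's gathered list of 1-cell coordinates.
theorem pv_outer (grid : List (List Int)) (sj ej : Int) (is : List Int)
    (s : Option Int × Option Int × Int × Int) :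
    is.foldl (fun s i => (PySem.List.pyRange sj (ej+1) 1).foldl
        (fun s j => if (PySem.List.pyGet? grid i).bind (fun row => PySem.List.pyGet? row j) = some 1 then pvStep s i j else s) s) s
      = (is.flatMap (fun i => ((PySem.List.pyRange sj (ej+1) 1).filter
            (fun j => (PySem.List.pyGet? grid i).bind (fun row => PySem.List.pyGet? row j) == some 1)).map (fun j => (i, j)))).foldl
          (fun s p => pvStep s p.1 p.2) s := by
  induction is generalizing s with
  | nil => rfl
  | cons a t ih =>
    rw [List.foldl_cons, pv_inner, List.flatMap_cons, List.foldl_append]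
    exact ih _

-- folding pvStep from a fully-initialised state is componentwise running min/max
theorem pv_fold_step (L : List (Int × Int)) (a b c d : Int) :
    L.foldl (fun s p => pvStep s p.1 p.2) (some a, some b, c, d)
      = (some ((L.map Prod.fst).foldl min a), some ((L.map Prod.snd).foldl min b),
         (L.map Prod.fst).foldl max c, (L.map Prod.snd).foldl max d) := by
  induction L generalizing a b c d with
  | nil => rfl
  | cons p t ih =>
    have h1 : (p :: t).foldl (fun s p => pvStep s p.1 p.2) (some a, some b, c, d)
        = t.foldl (fun s p => pvStep s p.1 p.2)
            (some (min a p.1), some (min b p.2), max c p.1, max d p.2) := rfl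
    rw [h1, ih]; simp

theorem minimumArea_py_eq (grid : List (List Int)) (si ei sj ej : Int)
    (hpre : Pre_minimumArea_py grid si ei sj ej) :
    minimumArea_py grid si ei sj ej = minimumArea_py_alt grid si ei sj ej := by
  unfold minimumArea_py minimumArea_py_alt
  rw [pv_outer]
  cases hcase : (PySem.List.pyRange si (ei+1) 1).flatMap
      (fun i => ((PySem.List.pyRange sj (ej+1) 1).filter
          (fun j => (PySem.List.pyGet? grid i).bind (fun row => PySem.List.pyGet? row j) == some 1)).map (fun j => (i, j))) with
  | nil => simp
  | cons p t =>
    -- the head cell lies in the ranges, hence is nonnegative under Pre_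
    have hmem : p ∈ (PySem.List.pyRange si (ei+1) 1).flatMap
        (fun i => ((PySem.List.pyRange sj (ej+1) 1).filter
            (fun j => (PySem.List.pyGet? grid i).bind (fun row => PySem.List.pyGet? row j) == some 1)).map (fun j => (i, j))) := by
      rw [hcase]; exact List.mem_cons_self
    obtain ⟨i, hi, hmap⟩ := List.mem_flatMap.mp hmem
    obtain ⟨j, hj, hpair⟩ := List.mem_map.mp hmap
    subst hpair
    have hjr : j ∈ PySem.List.pyRange sj (ej+1) 1 := List.mem_of_mem_filter hj
    have hib : si ≤ i ∧ i < ei + 1 := (PySem.List.mem_pyRange_one).mp hi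
    have hjb : sj ≤ j ∧ j < ej + 1 := (PySem.List.mem_pyRange_one).mp hjr
    have hnb : 0 ≤ si ∧ 0 ≤ sj ∧ ei < (grid.length : Int) ∧
        ∀ row ∈ (grid.drop si.toNat).take (ei + 1 - si).toNat, ej < (row.length : Int) :=
      hpre.resolve_left (by omega)
    have h0i : (0:Int) ≤ i := by omega
    have h0j : (0:Int) ≤ j := by omega
    have hstep : pvStep ((none : Option Int), (none : Option Int), (-1 : Int), (-1 : Int))
          (i, j).1 (i, j).2
        = (some i, some j, max (-1) i, max (-1) j) := rfl
    have hmx : max (-1 : Int) i = i := max_eq_right (by omega)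
    have hmy : max (-1 : Int) j = j := max_eq_right (by omega)
    simp only [List.foldl_cons]
    rw [hstep, hmx, hmy, pv_fold_step]
    simp only [List.isEmpty_cons, List.map_cons, PySem.List.max?_id_cons,
      PySem.List.min?_id_cons, Bool.false_eq_true, if_false, Option.getD_some]

-- ===== VERDICT (by name: the statement is the Claim_ definition above) =====
theorem minimumArea_py_spec : Claim_equal_minimumArea_py := by
  intro grid si ei sj ej _ hpre
  unfold Spec_minimumArea_py
  exact minimumArea_py_eq grid si ei sj ej hpre
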